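-- pv_equiv track=rewrite | github.com/haolunc/ARC-RL | reference_solutions/solutions/1e32b0e9.py | transform
-- ===== SOURCE A (Python) =====
-- def transform(grid):
--
--     g = [row[:] for row in grid]
--     h = len(g)
--     w = len(g[0])
--
--     line_rows = []
--     line_colour = None
--     for r in range(h):
--         row_set = set(g[r])
--         if len(row_set) == 1:
--             v = row_set.pop()
--             if v != 0:
--                 line_rows.append(r)
--                 line_colour = v
--     if len(line_rows) != 2:
--         raise ValueError("cannot find the two line rows")
--     N = line_rows[0]
--
--     template = []
--     for dr in range(N):
--         for dc in range(N):
--             v = g[dr][dc]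
--             if v != 0 and v != line_colour:
--                 template.append((dr, dc))
--
--     for i in range(3):
--         for j in range(3):
--             if i == 0 and j == 0:
--                 continue
--             base_r = i * (N + 1)
--             base_c = j * (N + 1)
--             for dr, dc in template:
--                 r = base_r + dr
--                 c = base_c + dc
--                 if g[r][c] == 0:
--                     g[r][c] = line_colour
--
--     return g
-- ===== SOURCE B (Python) =====
-- def transform(grid):
--     # per-cell functional rebuild: classify uniform rows, then map every cell
--     uniform = [(r, row[0]) for r, row in enumerate(grid)
--                if row and all(x == row[0] for x in row) and row[0] != 0]
--     if len(uniform) != 2: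
--         raise ValueError("cannot find the two line rows")
--     N = uniform[0][0]
--     colour = uniform[-1][1]
--     P = N + 1
--
--     def painted(r, c, v):
--         if v != 0:
--             return False
--         i, dr = divmod(r, P)
--         j, dc = divmod(c, P)
--         if i > 2 or j > 2 or (i == 0 and j == 0) or dr >= N or dc >= N:
--             return False
--         s = grid[dr][dc]
--         return s != 0 and s != colour
--
--     return [[colour if painted(r, c, v) else v
--              for c, v in enumerate(row)]
--             for r, row in enumerate(grid)]
-- ===== Notes on version B (the rewrite author's own statement) =====
-- stated objective: alternative
-- what changed: A builds an explicit template coordinate list and then mutates a grid copy block by block (stamp-if-zero in place); B instead rebuilds the grid as a single pure per-cell map, classifying each cell by divmod(N+1) into its 3x3 block and reading the corresponding source-block cell.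
import Mathlib
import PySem

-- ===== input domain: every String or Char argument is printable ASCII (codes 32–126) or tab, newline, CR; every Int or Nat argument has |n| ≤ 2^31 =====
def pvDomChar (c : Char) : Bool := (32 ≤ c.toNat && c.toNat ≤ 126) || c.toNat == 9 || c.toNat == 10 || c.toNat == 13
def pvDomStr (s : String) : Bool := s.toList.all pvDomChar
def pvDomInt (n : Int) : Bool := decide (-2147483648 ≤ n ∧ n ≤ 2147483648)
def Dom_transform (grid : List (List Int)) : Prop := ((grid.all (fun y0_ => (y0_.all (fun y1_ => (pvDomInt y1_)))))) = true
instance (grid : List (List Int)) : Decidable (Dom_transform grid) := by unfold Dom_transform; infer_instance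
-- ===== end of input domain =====

-- B rebuilds the grid as a pure per-cell map (classifying each cell from the source block) instead of
-- A's template list + in-place stamping; return values are proved equal on Pre_ (exactly where the
-- Python A returns without raising). Neither program mutates its argument.

-- shared read helper: g[r][c]; exact where the index is in range (Pre_ guarantees every read is)
def pvGetCell (g : List (List Int)) (r c : Nat) : Int := (g.getD r []).getD c 0

-- ===== PORT A =====
-- set(row); if the set is a singleton {v} with v != 0, the row is a line row of colour v
def pvRowVal? (row : List Int) : Option Int :=
  match PySem.Set.ofList row with
  | [v] => if v ≠ 0 then some v else none
  | _ => none

-- the first loop: collect line_rows and line_colour (last one wins)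
def pvLinesA (grid : List (List Int)) : List Nat × Option Int :=
  grid.zipIdx.foldl (fun acc p =>
    match pvRowVal? p.1 with
    | some v => (acc.1 ++ [p.2], some v)
    | none => acc) ([], none)

-- the template loop
def pvTemplate (grid : List (List Int)) (N : Nat) (colour : Int) : List (Nat × Nat) :=
  (List.range N).foldl (fun acc dr =>
    (List.range N).foldl (fun acc2 dc =>
      if pvGetCell grid dr dc ≠ 0 ∧ pvGetCell grid dr dc ≠ colour
      then acc2 ++ [(dr, dc)] else acc2) acc) []

-- 'if g[r][c] == 0: g[r][c] = line_colour'
def pvStamp (colour : Int) (g : List (List Int)) (p : Nat × Nat) : List (List Int) :=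
  if pvGetCell g p.1 p.2 = 0 then g.modify p.1 (fun row => row.set p.2 colour) else g

-- the stamping loops over the 3x3 blocks (skipping (0,0)) and the template
def pvStampAll (grid : List (List Int)) (N : Nat) (colour : Int) : List (List Int) :=
  (List.range 3).foldl (fun g i =>
    (List.range 3).foldl (fun g2 j =>
      if i = 0 ∧ j = 0 then g2
      else (pvTemplate grid N colour).foldl
        (fun g3 p => pvStamp colour g3 (i * (N + 1) + p.1, j * (N + 1) + p.2)) g2) g) grid

def transform (grid : List (List Int)) : List (List Int) :=
  let lr := pvLinesA grid
  if lr.1.length = 2 then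
    pvStampAll grid (lr.1.headD 0) (lr.2.getD 0)
  else grid  -- Python raises ValueError here; excluded by Pre_transform

-- ===== PORT B =====
-- B's comprehension: [(r, row[0]) for r, row in enumerate(grid) if row and all(x == row[0] ...) and row[0] != 0]
def pvUniform (grid : List (List Int)) : List (Nat × Int) :=
  grid.zipIdx.filterMap (fun p =>
    if p.1 ≠ [] ∧ (∀ x ∈ p.1, x = p.1.headD 0) ∧ p.1.headD 0 ≠ 0
    then some (p.2, p.1.headD 0) else none)

-- B's 'painted(r, c, v)' test (divmod by N+1)
def pvPainted (grid : List (List Int)) (N : Nat) (colour : Int) (r c : Nat) (v : Int) : Bool :=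
  v == 0 && decide (r / (N + 1) < 3) && decide (c / (N + 1) < 3) &&
  !(decide (r / (N + 1) = 0) && decide (c / (N + 1) = 0)) &&
  decide (r % (N + 1) < N) && decide (c % (N + 1) < N) &&
  pvGetCell grid (r % (N + 1)) (c % (N + 1)) != 0 &&
  pvGetCell grid (r % (N + 1)) (c % (N + 1)) != colour

def transform_alt (grid : List (List Int)) : List (List Int) :=
  let u := pvUniform grid
  if u.length = 2 then
    grid.zipIdx.map (fun p =>
      p.1.zipIdx.map (fun q =>
        if pvPainted grid (u.headD (0, 0)).1 (u.getLastD (0, 0)).2 p.2 q.2 q.1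
        then (u.getLastD (0, 0)).2 else q.1))
  else grid  -- Python raises ValueError here; excluded by Pre_transform

-- ===== PRECONDITION & SPEC =====
def pvN (grid : List (List Int)) : Nat := ((pvUniform grid).headD (0, 0)).1
def pvColour (grid : List (List Int)) : Int := ((pvUniform grid).getLastD (0, 0)).2

-- exactly the inputs on which the Python A returns: two uniform non-zero rows, the top-left N x N
-- source block fully present, and every stamped target cell inside the (possibly ragged) grid
def Pre_transform (grid : List (List Int)) : Prop :=
  (pvUniform grid).length = 2 ∧
  (∀ dr ∈ List.range (pvN grid), pvN grid ≤ (grid.getD dr []).length) ∧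
  (∀ i ∈ List.range 3, ∀ j ∈ List.range 3, ¬(i = 0 ∧ j = 0) →
    ∀ dr ∈ List.range (pvN grid), ∀ dc ∈ List.range (pvN grid),
    pvGetCell grid dr dc ≠ 0 → pvGetCell grid dr dc ≠ pvColour grid →
    i * (pvN grid + 1) + dr < grid.length ∧
    j * (pvN grid + 1) + dc < (grid.getD (i * (pvN grid + 1) + dr) []).length)
instance (grid : List (List Int)) : Decidable (Pre_transform grid) := by
  unfold Pre_transform; infer_instance

def pvWitness_transform : List (List Int) :=
  [[2, 0, 0, 0, 0], [5, 5, 5, 5, 5], [0, 0, 0, 0, 0], [5, 5, 5, 5, 5], [0, 0, 0, 0, 0]]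

def Spec_transform (grid : List (List Int)) (out : List (List Int)) : Prop := out = transform_alt grid
instance (grid : List (List Int)) (out : List (List Int)) : Decidable (Spec_transform grid out) := by unfold Spec_transform; infer_instance

-- ===== CLAIM (what is proved, stated in full; the proofs are below) =====
def Claim_equal_transform : Prop := ∀ (grid : List (List Int)), Dom_transform grid → Pre_transform grid → Spec_transform grid (transform grid)

-- ===== LEMMAS AND PROOFS =====

-- the template-cell test, as a predicate
abbrev pvQ (grid : List (List Int)) (colour : Int) (dr dc : Nat) : Prop :=
  pvGetCell grid dr dc ≠ 0 ∧ pvGetCell grid dr dc ≠ colour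

-- the 8 stamped blocks, and the full list of stamped target coordinates
def pvBlocks : List (Nat × Nat) := [(0,1), (0,2), (1,0), (1,1), (1,2), (2,0), (2,1), (2,2)]

def pvT (grid : List (List Int)) (N : Nat) (colour : Int) : List (Nat × Nat) :=
  pvBlocks.flatMap (fun b =>
    (pvTemplate grid N colour).map (fun p => (b.1 * (N + 1) + p.1, b.2 * (N + 1) + p.2)))

-- ---- detection equivalence ----

lemma ofList_singleton_iff (row : List Int) (v : Int) :
    PySem.Set.ofList row = [v] ↔ row ≠ [] ∧ ∀ x ∈ row, x = v := by
  cases row with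
  | nil => simp [PySem.Set.ofList]
  | cons x xs =>
    rw [PySem.Set.ofList_cons]
    constructor
    · intro h
      have hx : x = v := by simpa using congrArg (fun l => l.headD 0) h
      have hd : (PySem.Set.ofList xs).discard x = [] := by
        have := congrArg List.tail h; simpa using this
      refine ⟨by simp, ?_⟩
      intro y hy
      rcases List.mem_cons.mp hy with rfl | hy
      · exact hx
      · by_contra hne
        have : y ∈ (PySem.Set.ofList xs).discard x := by
          rw [PySem.Set.mem_discard, PySem.Set.mem_ofList]
          exact ⟨hy, by rw [hx]; exact fun h' => hne (h' ▸ rfl)⟩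
        rw [hd] at this; exact absurd this (List.not_mem_nil)
    · rintro ⟨-, hall⟩
      have hx : x = v := hall x List.mem_cons_self
      have hd : (PySem.Set.ofList xs).discard x = [] := by
        rw [List.eq_nil_iff_forall_not_mem]
        intro y hy
        rw [PySem.Set.mem_discard, PySem.Set.mem_ofList] at hy
        exact hy.2 (by rw [hall y (List.mem_cons_of_mem x hy.1), hx])
      rw [hx] at hd ⊢
      rw [hd]

lemma rowVal?_eq (row : List Int) :
    pvRowVal? row =
      if row ≠ [] ∧ (∀ x ∈ row, x = row.headD 0) ∧ row.headD 0 ≠ 0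
      then some (row.headD 0) else none := by
  unfold pvRowVal?
  rcases h : PySem.Set.ofList row with - | ⟨v, - | ⟨w, t⟩⟩
  · have hrow : row = [] := by
      rw [List.eq_nil_iff_forall_not_mem]
      intro y hy
      have : y ∈ PySem.Set.ofList row := (PySem.Set.mem_ofList _ _).mpr hy
      rw [h] at this; exact absurd this (List.not_mem_nil)
    simp [hrow]
  · obtain ⟨hne, hall⟩ := (ofList_singleton_iff row v).mp h
    have hh : row.headD 0 = v := by
      cases row with
      | nil => exact absurd rfl hne
      | cons x xs => simpa using hall x List.mem_cons_self
    by_cases hv : v = 0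
    · subst hv
      show (if (0 : Int) ≠ 0 then some (0 : Int) else none) = _
      rw [if_neg (by simp), if_neg (fun hcon => hcon.2.2 hh)]
    · show (if v ≠ 0 then some v else none) = _
      rw [if_pos hv, if_pos ⟨hne, fun x hx => (hall x hx).trans hh.symm, hh.trans_ne hv⟩, hh]
  · show none = _
    rw [if_neg]
    rintro ⟨hne, hall, hz⟩
    have := (ofList_singleton_iff row (row.headD 0)).mpr ⟨hne, hall⟩
    rw [h] at this; exact absurd this (by simp)

lemma lines_aux (l : List (List Int)) (k : Nat) (a : List Nat) (c : Option Int) :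
    (l.zipIdx k).foldl (fun acc p =>
        match pvRowVal? p.1 with
        | some v => (acc.1 ++ [p.2], some v)
        | none => acc) (a, c) =
      (a ++ ((l.zipIdx k).filterMap (fun p =>
          if p.1 ≠ [] ∧ (∀ x ∈ p.1, x = p.1.headD 0) ∧ p.1.headD 0 ≠ 0
          then some (p.2, p.1.headD 0) else none)).map Prod.fst,
       ((l.zipIdx k).filterMap (fun p =>
          if p.1 ≠ [] ∧ (∀ x ∈ p.1, x = p.1.headD 0) ∧ p.1.headD 0 ≠ 0
          then some (p.2, p.1.headD 0) else none)).foldl (fun _ p => some p.2) c) := by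
  induction l generalizing k a c with
  | nil => simp
  | cons row l ih =>
    by_cases hc : row ≠ [] ∧ (∀ x ∈ row, x = row.headD 0) ∧ row.headD 0 ≠ 0
    · have hrv : pvRowVal? row = some (row.headD 0) := by rw [rowVal?_eq, if_pos hc]
      simp only [List.zipIdx_cons, List.foldl_cons, List.filterMap_cons, hrv, hc, ne_eq,
        eq_true hc.2.1, not_false_eq_true, and_true, if_true]
      rw [ih (k + 1) (a ++ [k]) (some (row.headD 0))]
      simp
    · have hrv : pvRowVal? row = none := by rw [rowVal?_eq, if_neg hc]
      simp only [List.zipIdx_cons, List.foldl_cons, List.filterMap_cons, hrv, hc, if_false]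
      exact ih (k + 1) a c

lemma linesA_eq (grid : List (List Int)) :
    pvLinesA grid = ((pvUniform grid).map Prod.fst,
      (pvUniform grid).foldl (fun _ p => some p.2) none) := by
  unfold pvLinesA pvUniform
  simpa only [List.nil_append] using lines_aux grid 0 [] none

-- ---- template characterisation ----

lemma foldl_append_ifP {α β : Type} (p : α → Prop) [DecidablePred p] (f : α → β)
    (l : List α) (acc : List β) :
    l.foldl (fun acc x => if p x then acc ++ [f x] else acc) acc
      = acc ++ (l.filter (fun x => decide (p x))).map f := by
  have := PySem.List.foldl_append_if (fun x => decide (p x)) f l acc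
  simpa using this

lemma template_eq (grid : List (List Int)) (N : Nat) (colour : Int) :
    pvTemplate grid N colour =
      (List.range N).flatMap (fun dr =>
        ((List.range N).filter (fun dc => decide (pvQ grid colour dr dc))).map
          (fun dc => (dr, dc))) := by
  unfold pvTemplate
  have hinner : ∀ (dr : Nat) (acc : List (Nat × Nat)),
      (List.range N).foldl (fun acc2 dc =>
        if pvGetCell grid dr dc ≠ 0 ∧ pvGetCell grid dr dc ≠ colour
        then acc2 ++ [(dr, dc)] else acc2) acc
      = acc ++ ((List.range N).filter (fun dc => decide (pvQ grid colour dr dc))).map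
          (fun dc => (dr, dc)) := by
    intro dr acc
    exact foldl_append_ifP (fun dc => pvQ grid colour dr dc) (fun dc => (dr, dc)) _ acc
  calc (List.range N).foldl (fun acc dr =>
        (List.range N).foldl (fun acc2 dc =>
          if pvGetCell grid dr dc ≠ 0 ∧ pvGetCell grid dr dc ≠ colour
          then acc2 ++ [(dr, dc)] else acc2) acc) []
      = (List.range N).foldl (fun acc dr =>
          acc ++ ((List.range N).filter (fun dc => decide (pvQ grid colour dr dc))).map
            (fun dc => (dr, dc))) [] := by
        exact PySem.List.foldl_congr_mem _ _ _ _ (fun acc dr _ => hinner dr acc)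
    _ = _ := by
        rw [PySem.List.foldl_append_eq_flatMap]; simp

lemma mem_template (grid : List (List Int)) (N : Nat) (colour : Int) (dr dc : Nat) :
    (dr, dc) ∈ pvTemplate grid N colour ↔ dr < N ∧ dc < N ∧ pvQ grid colour dr dc := by
  rw [template_eq]
  simp only [List.mem_flatMap, List.mem_map, List.mem_filter, List.mem_range,
    decide_eq_true_eq]
  constructor
  · rintro ⟨a, ha, b, ⟨hb, hq⟩, heq⟩
    cases heq
    exact ⟨ha, hb, hq⟩
  · rintro ⟨h1, h2, h3⟩
    exact ⟨dr, h1, dc, ⟨h2, h3⟩, rfl⟩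

lemma nodup_template (grid : List (List Int)) (N : Nat) (colour : Int) :
    (pvTemplate grid N colour).Nodup := by
  rw [template_eq, List.nodup_flatMap]
  constructor
  · intro dr _
    exact (List.nodup_range.filter _).map (fun a b h => by simpa using (Prod.mk.injEq .. ▸ h).2)
  · refine List.pairwise_lt_range.imp ?_
    intro a b hab
    intro x hxa hxb
    simp only [List.mem_map, List.mem_filter] at hxa hxb
    obtain ⟨da, -, rfl⟩ := hxa
    obtain ⟨db, -, hdb⟩ := hxb
    injection hdb with h1 h2
    omega

-- ---- the target list ----

lemma mem_blocks (i j : Nat) : (i, j) ∈ pvBlocks ↔ i < 3 ∧ j < 3 ∧ ¬(i = 0 ∧ j = 0) := by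
  simp only [pvBlocks, List.mem_cons, List.not_mem_nil, or_false, Prod.mk.injEq]
  omega

lemma divmod_decomp (i dr N : Nat) (h : dr < N + 1) :
    (i * (N + 1) + dr) / (N + 1) = i ∧ (i * (N + 1) + dr) % (N + 1) = dr := by
  constructor
  · rw [Nat.mul_comm, Nat.mul_add_div (by omega), Nat.div_eq_of_lt h]; omega
  · rw [Nat.mul_comm, Nat.mul_add_mod, Nat.mod_eq_of_lt h]

lemma mem_T_iff (grid : List (List Int)) (N : Nat) (colour : Int) (r c : Nat) :
    (r, c) ∈ pvT grid N colour ↔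
      (r / (N + 1) < 3 ∧ c / (N + 1) < 3 ∧ ¬(r / (N + 1) = 0 ∧ c / (N + 1) = 0) ∧
       r % (N + 1) < N ∧ c % (N + 1) < N ∧ pvQ grid colour (r % (N + 1)) (c % (N + 1))) := by
  unfold pvT
  simp only [List.mem_flatMap, List.mem_map]
  constructor
  · rintro ⟨⟨i, j⟩, hb, ⟨da, db⟩, hp, heq⟩
    obtain ⟨h1, h2, h3⟩ := (mem_blocks i j).mp hb
    obtain ⟨hda, hdb, hq⟩ := (mem_template grid N colour da db).mp hp
    injection heq with hr hc
    subst hr; subst hc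
    obtain ⟨hdiv1, hmod1⟩ := divmod_decomp i da N (by omega)
    obtain ⟨hdiv2, hmod2⟩ := divmod_decomp j db N (by omega)
    rw [hdiv1, hmod1, hdiv2, hmod2]
    exact ⟨h1, h2, h3, hda, hdb, hq⟩
  · rintro ⟨h1, h2, h3, h4, h5, hq⟩
    refine ⟨(r / (N + 1), c / (N + 1)), (mem_blocks _ _).mpr ⟨h1, h2, h3⟩,
      (r % (N + 1), c % (N + 1)), (mem_template grid N colour _ _).mpr ⟨h4, h5, hq⟩, ?_⟩
    have hr : r / (N + 1) * (N + 1) + r % (N + 1) = r := by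
      rw [Nat.mul_comm]; exact Nat.div_add_mod r (N + 1)
    have hc : c / (N + 1) * (N + 1) + c % (N + 1) = c := by
      rw [Nat.mul_comm]; exact Nat.div_add_mod c (N + 1)
    simp only [Prod.mk.injEq]
    exact ⟨hr, hc⟩

lemma nodup_T (grid : List (List Int)) (N : Nat) (colour : Int) :
    (pvT grid N colour).Nodup := by
  unfold pvT
  rw [List.nodup_flatMap]
  constructor
  · intro b _
    refine (nodup_template grid N colour).map ?_
    intro p q h
    injection h with h1 h2
    have := Prod.ext_iff.mpr (⟨by omega, by omega⟩ : p.1 = q.1 ∧ p.2 = q.2)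
    exact this
  · have hnd : pvBlocks.Nodup := by decide
    refine hnd.imp ?_
    intro b b' hne
    intro x hx hy
    simp only [List.mem_map] at hx hy
    obtain ⟨p, hp, rfl⟩ := hx
    obtain ⟨q, hq, heq⟩ := hy
    obtain ⟨hp1, hp2, -⟩ := (mem_template grid N colour p.1 p.2).mp hp
    obtain ⟨hq1, hq2, -⟩ := (mem_template grid N colour q.1 q.2).mp hq
    injection heq with h1 h2
    apply hne
    have e1 : b'.1 = b.1 := by
      have a1 := (divmod_decomp b'.1 q.1 N (by omega)).1
      have a2 := (divmod_decomp b.1 p.1 N (by omega)).1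
      rw [← a1, ← a2, h1]
    have e2 : b'.2 = b.2 := by
      have a1 := (divmod_decomp b'.2 q.2 N (by omega)).1
      have a2 := (divmod_decomp b.2 p.2 N (by omega)).1
      rw [← a1, ← a2, h2]
    exact Prod.ext_iff.mpr ⟨e1.symm, e2.symm⟩

lemma stampAll_eq_foldT (grid : List (List Int)) (N : Nat) (colour : Int) :
    pvStampAll grid N colour = (pvT grid N colour).foldl (pvStamp colour) grid := by
  have h3 : List.range 3 = [0, 1, 2] := rfl
  unfold pvStampAll pvT pvBlocks
  rw [h3]
  simp only [List.foldl_cons, List.foldl_nil, List.flatMap_cons, List.flatMap_nil,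
    List.foldl_append, List.foldl_map]
  norm_num

-- ---- the stamping fold, cell by cell ----

lemma getD_set (row : List Int) (b : Nat) (v : Int) (c : Nat) :
    (row.set b v).getD c 0 = if c = b ∧ b < row.length then v else row.getD c 0 := by
  rw [List.getD_eq_getElem?_getD, List.getD_eq_getElem?_getD, List.getElem?_set]
  by_cases h1 : b = c
  · subst h1
    by_cases h2 : b < row.length
    · rw [if_pos rfl, if_pos h2, if_pos ⟨rfl, h2⟩]; rfl
    · rw [if_pos rfl, if_neg h2, if_neg (fun hcon => h2 hcon.2)]
      rw [List.getElem?_eq_none (by omega)]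
  · rw [if_neg h1, if_neg (fun hcon => h1 hcon.1.symm)]

lemma getD_modify (g : List (List Int)) (a : Nat) (f : List Int → List Int) (r : Nat) :
    (g.modify a f).getD r [] = if r = a ∧ r < g.length then f (g.getD r []) else g.getD r [] := by
  rw [List.getD_eq_getElem?_getD, List.getD_eq_getElem?_getD, List.getElem?_modify]
  by_cases h1 : r = a
  · subst h1
    by_cases h2 : r < g.length
    · rw [if_pos ⟨rfl, h2⟩]
      rw [List.getElem?_eq_getElem h2]
      simp
    · rw [if_neg (by tauto)]
      rw [List.getElem?_eq_none (by omega)]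
      simp
  · rw [if_neg (by tauto)]
    cases hg : g[r]? <;> simp [Ne.symm h1]

lemma getCell_stamp (colour : Int) (g : List (List Int)) (p : Nat × Nat) (r c : Nat) :
    pvGetCell (pvStamp colour g p) r c =
      if r = p.1 ∧ c = p.2 ∧ p.2 < (g.getD p.1 []).length ∧ pvGetCell g p.1 p.2 = 0
      then colour else pvGetCell g r c := by
  unfold pvStamp
  by_cases h0 : pvGetCell g p.1 p.2 = 0
  · rw [if_pos h0]
    unfold pvGetCell
    rw [getD_modify]
    by_cases h : r = p.1 ∧ r < g.length
    · obtain ⟨h1, h2⟩ := h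
      subst h1
      rw [if_pos ⟨rfl, h2⟩]
      show ((g.getD p.1 []).set p.2 colour).getD c 0 = _
      rw [getD_set]
      by_cases h3 : c = p.2 ∧ p.2 < (g.getD p.1 []).length
      · rw [if_pos h3, if_pos ⟨rfl, h3.1, h3.2, h0⟩]
      · rw [if_neg h3, if_neg (fun hcon => h3 ⟨hcon.2.1, hcon.2.2.1⟩)]
    · rw [if_neg h]
      by_cases h1 : r = p.1
      · subst h1
        have h2 : ¬ p.1 < g.length := fun h2 => h ⟨rfl, h2⟩
        have hga : g.getD p.1 [] = [] := by
          rw [List.getD_eq_getElem?_getD, List.getElem?_eq_none (by omega)]; rfl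
        rw [if_neg (by rw [hga]; rintro ⟨-, -, hlen, -⟩; simp at hlen)]
      · rw [if_neg (fun hcon => h1 hcon.1)]
  · rw [if_neg h0, if_neg (fun hcon => h0 hcon.2.2.2)]

lemma stamp_rowlen (colour : Int) (g : List (List Int)) (p : Nat × Nat) (r : Nat) :
    ((pvStamp colour g p).getD r []).length = (g.getD r []).length := by
  unfold pvStamp
  split
  · rw [getD_modify]
    split
    · rw [List.length_set]
    · rfl
  · rfl

lemma stamp_length (colour : Int) (g : List (List Int)) (p : Nat × Nat) :
    (pvStamp colour g p).length = g.length := by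
  unfold pvStamp
  split <;> simp

lemma foldT_rowlen (colour : Int) (T : List (Nat × Nat)) (g : List (List Int)) (r : Nat) :
    ((T.foldl (pvStamp colour) g).getD r []).length = (g.getD r []).length := by
  induction T generalizing g with
  | nil => rfl
  | cons p T ih => rw [List.foldl_cons, ih, stamp_rowlen]

lemma foldT_length (colour : Int) (T : List (Nat × Nat)) (g : List (List Int)) :
    (T.foldl (pvStamp colour) g).length = g.length := by
  induction T generalizing g with
  | nil => rfl
  | cons p T ih => rw [List.foldl_cons, ih, stamp_length]

lemma stamp_fold_get (colour : Int) (grid : List (List Int)) :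
    ∀ (T : List (Nat × Nat)) (g : List (List Int)), T.Nodup →
    (∀ p ∈ T, p.1 < grid.length ∧ p.2 < (grid.getD p.1 []).length) →
    (∀ r, (g.getD r []).length = (grid.getD r []).length) →
    (∀ p ∈ T, pvGetCell g p.1 p.2 = pvGetCell grid p.1 p.2) →
    ∀ r c, pvGetCell (T.foldl (pvStamp colour) g) r c =
      if (r, c) ∈ T ∧ pvGetCell grid r c = 0 then colour else pvGetCell g r c := by
  intro T
  induction T with
  | nil => intro g _ _ _ _ r c; simp
  | cons p T ih =>
    intro g hnd hT hlen hg r c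
    rw [List.foldl_cons]
    have hp := hT p List.mem_cons_self
    have hgp : pvGetCell g p.1 p.2 = pvGetCell grid p.1 p.2 := hg p List.mem_cons_self
    have hnd' : T.Nodup := hnd.of_cons
    have hpT : p ∉ T := (List.nodup_cons.mp hnd).1
    have hT' : ∀ q ∈ T, q.1 < grid.length ∧ q.2 < (grid.getD q.1 []).length :=
      fun q hq => hT q (List.mem_cons_of_mem p hq)
    have hlen' : ∀ r, ((pvStamp colour g p).getD r []).length = (grid.getD r []).length :=
      fun r => (stamp_rowlen colour g p r).trans (hlen r)
    have hg' : ∀ q ∈ T, pvGetCell (pvStamp colour g p) q.1 q.2 = pvGetCell grid q.1 q.2 := by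
      intro q hq
      rw [getCell_stamp]
      rw [if_neg (by
        rintro ⟨e1, e2, -, -⟩
        exact hpT (by
          have : q = p := Prod.ext_iff.mpr ⟨e1, e2⟩
          exact this ▸ hq))]
      exact hg q (List.mem_cons_of_mem p hq)
    rw [ih (pvStamp colour g p) hnd' hT' hlen' hg' r c]
    by_cases hmem : (r, c) ∈ T
    · by_cases h0 : pvGetCell grid r c = 0
      · rw [if_pos ⟨hmem, h0⟩, if_pos ⟨List.mem_cons_of_mem p hmem, h0⟩]
      · rw [if_neg (fun hcon => h0 hcon.2), if_neg (fun hcon => h0 hcon.2)]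
        rw [getCell_stamp]
        rw [if_neg (by
          rintro ⟨e1, e2, -, -⟩
          exact hpT (by
            have : (r, c) = p := Prod.ext_iff.mpr ⟨e1, e2⟩
            exact this ▸ hmem))]
    · by_cases hrc : (r, c) = p
      · have hrc1 : r = p.1 := congrArg Prod.fst hrc
        have hrc2 : c = p.2 := congrArg Prod.snd hrc
        rw [if_neg (fun hcon => hmem hcon.1)]
        rw [getCell_stamp]
        have hglen : (g.getD p.1 []).length = (grid.getD p.1 []).length := hlen p.1
        by_cases h0 : pvGetCell grid r c = 0
        · have h0' : pvGetCell g p.1 p.2 = 0 := by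
            rw [hgp, ← hrc1, ← hrc2]; exact h0
          rw [if_pos ⟨hrc1, hrc2, by rw [hglen]; rw [← hrc1, ← hrc2]; exact (hrc1 ▸ hrc2 ▸ hp.2), h0'⟩]
          rw [if_pos ⟨hrc ▸ List.mem_cons_self, h0⟩]
        · have h0' : ¬ pvGetCell g p.1 p.2 = 0 := by
            rw [hgp, ← hrc1, ← hrc2]; exact h0
          rw [if_neg (fun hcon => h0' hcon.2.2.2)]
          rw [if_neg (fun hcon => h0 hcon.2)]
      · rw [if_neg (fun hcon => hmem hcon.1)]
        rw [getCell_stamp]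
        rw [if_neg (fun hcon => hrc (Prod.ext_iff.mpr ⟨hcon.1, hcon.2.1⟩))]
        rw [if_neg (by
          rintro ⟨hm, h0⟩
          rcases List.mem_cons.mp hm with he | hm'
          · exact hrc he
          · exact hmem hm')]

lemma painted_iff (grid : List (List Int)) (N : Nat) (colour : Int) (r c : Nat) (v : Int) :
    pvPainted grid N colour r c v = true ↔ (v = 0 ∧ (r, c) ∈ pvT grid N colour) := by
  rw [mem_T_iff]
  unfold pvPainted
  simp only [Bool.and_eq_true, Bool.not_eq_true', Bool.and_eq_false_iff, beq_iff_eq,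
    bne_iff_ne, decide_eq_true_eq, decide_eq_false_iff_not, ne_eq]
  constructor
  · rintro ⟨⟨⟨⟨⟨⟨⟨h0, hd1⟩, hd2⟩, hnz⟩, hm1⟩, hm2⟩, hq1⟩, hq2⟩
    refine ⟨h0, hd1, hd2, ?_, hm1, hm2, hq1, hq2⟩
    rcases hnz with h | h
    · exact fun hcon => h hcon.1
    · exact fun hcon => h hcon.2
  · rintro ⟨h0, hd1, hd2, hnz, hm1, hm2, hq1, hq2⟩
    refine ⟨⟨⟨⟨⟨⟨⟨h0, hd1⟩, hd2⟩, ?_⟩, hm1⟩, hm2⟩, hq1⟩, hq2⟩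
    by_cases ha : r / (N + 1) = 0
    · exact Or.inr (fun hb => hnz ⟨ha, hb⟩)
    · exact Or.inl ha

-- ===== VERDICT (by name: the statement is the Claim_ definition above) =====
theorem transform_spec : Claim_equal_transform := by
  intro grid _dom pre
  unfold Spec_transform
  obtain ⟨h2, hsrc, hbound⟩ := pre
  obtain ⟨p, q, hu⟩ := List.length_eq_two.mp h2
  have hN : pvN grid = p.1 := by rw [pvN, hu]; rfl
  have hC : pvColour grid = q.2 := by rw [pvColour, hu]; rfl
  rw [hN] at hsrc
  rw [hN, hC] at hbound
  have hbody : transform grid = pvStampAll grid p.1 q.2 := by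
    rw [transform]
    rw [linesA_eq, hu]
    simp
  have hbody' : transform_alt grid =
      grid.zipIdx.map (fun pr =>
        pr.1.zipIdx.map (fun qr =>
          if pvPainted grid p.1 q.2 pr.2 qr.2 qr.1 then q.2 else qr.1)) := by
    rw [transform_alt, hu]
    simp
  rw [hbody, hbody', stampAll_eq_foldT]
  have hTb : ∀ t ∈ pvT grid p.1 q.2, t.1 < grid.length ∧ t.2 < (grid.getD t.1 []).length := by
    intro t ht
    unfold pvT at ht
    simp only [List.mem_flatMap, List.mem_map] at ht
    obtain ⟨⟨i, j⟩, hb, ⟨da, db⟩, hp, rfl⟩ := ht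
    obtain ⟨hi3, hj3, hnz⟩ := (mem_blocks i j).mp hb
    obtain ⟨hda, hdb, hq1, hq2⟩ := (mem_template grid p.1 q.2 da db).mp hp
    exact hbound i (List.mem_range.mpr hi3) j (List.mem_range.mpr hj3) hnz
      da (List.mem_range.mpr hda) db (List.mem_range.mpr hdb) hq1 hq2
  have hcells := stamp_fold_get q.2 grid (pvT grid p.1 q.2) grid
    (nodup_T grid p.1 q.2) hTb (fun _ => rfl) (fun _ _ => rfl)
  apply List.ext_getElem
  · rw [foldT_length]; simp
  intro r h1r h2r
  have hrL : r < grid.length := by rw [foldT_length] at h1r; exact h1r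
  have hrowlen : ((pvT grid p.1 q.2).foldl (pvStamp q.2) grid)[r].length
      = (grid.getD r []).length := by
    rw [← List.getD_eq_getElem _ [] h1r]
    exact foldT_rowlen q.2 _ grid r
  rw [List.getElem_map, List.getElem_zipIdx, Nat.zero_add]
  apply List.ext_getElem
  · rw [hrowlen, List.getD_eq_getElem _ [] hrL]; simp
  intro c hc1 hc2
  have hcL : c < (grid.getD r []).length := by rw [← hrowlen]; exact hc1
  have hcL' : c < (grid[r]'hrL).length := by
    rw [← List.getD_eq_getElem _ [] hrL]; exact hcL
  rw [List.getElem_map, List.getElem_zipIdx, Nat.zero_add]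
  have hlhs : ((pvT grid p.1 q.2).foldl (pvStamp q.2) grid)[r][c]
      = pvGetCell ((pvT grid p.1 q.2).foldl (pvStamp q.2) grid) r c := by
    unfold pvGetCell
    rw [List.getD_eq_getElem _ [] h1r, List.getD_eq_getElem _ 0 hc1]
  have hcell0 : (grid[r]'hrL)[c]'hcL' = pvGetCell grid r c := by
    unfold pvGetCell
    rw [List.getD_eq_getElem _ [] hrL, List.getD_eq_getElem _ 0 hcL']
  rw [hlhs, hcells r c]
  by_cases hpnt : pvPainted grid p.1 q.2 r c ((grid[r]'hrL)[c]'hcL') = true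
  · obtain ⟨h0, hmem⟩ := (painted_iff grid p.1 q.2 r c _).mp hpnt
    rw [if_pos hpnt, if_pos ⟨hmem, by rw [← hcell0]; exact h0⟩]
  · rw [if_neg hpnt]
    rw [if_neg (fun hcon => hpnt ((painted_iff grid p.1 q.2 r c _).mpr
      ⟨by rw [hcell0]; exact hcon.2, hcon.1⟩))]
    exact hcell0.symm
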